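-- pv_equiv track=rewrite | github.com/ferran137/TFG | Entorn Doors/DoorsGraficaMitjanaRuns.py | state_to_row
-- ===== SOURCE A (Python) =====
-- def state_to_row(observation):
--     row_f=0
--     for i in range(0,observation[0]):
--         row_f +=4
--
--     if observation[1] == False and observation[2] == False:
--         row_f += 0
--     if observation[1] == True and observation[2] == False:
--         row_f += 1
--     if observation[1] == True and observation[2] == True:
--         row_f += 2
--     if observation[1] == False and observation[2] == True:
--         row_f += 3
--     return row_f
-- ===== SOURCE B (Python) =====
-- _OFFSETS = {(0, 0): 0, (1, 0): 1, (1, 1): 2, (0, 1): 3}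
--
-- def state_to_row(observation):
--     return 4 * max(observation[0], 0) + _OFFSETS.get((observation[1], observation[2]), 0)
-- ===== Notes on version B (the rewrite author's own statement) =====
-- stated objective: simpler
-- what changed: The counting loop over range of the first element is replaced by the closed form 4*max(first element, 0), and the four if-chains by a single fixed dict lookup keyed on the pair of the second and third elements.
-- outside the precondition, e.g. on state_to_row([0, 2]): A returns 0, B raises IndexError
import Mathlib
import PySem

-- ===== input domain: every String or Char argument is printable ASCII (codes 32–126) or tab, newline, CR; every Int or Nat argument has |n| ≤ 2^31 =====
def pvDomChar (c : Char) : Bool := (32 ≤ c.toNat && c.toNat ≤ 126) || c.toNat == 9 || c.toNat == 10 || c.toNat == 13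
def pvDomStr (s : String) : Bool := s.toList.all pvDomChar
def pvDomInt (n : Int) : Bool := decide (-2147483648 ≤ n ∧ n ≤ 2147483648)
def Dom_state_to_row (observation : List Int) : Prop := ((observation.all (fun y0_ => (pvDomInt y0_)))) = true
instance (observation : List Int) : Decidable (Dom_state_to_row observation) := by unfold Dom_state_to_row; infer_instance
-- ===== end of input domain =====

-- B replaces A's counting loop with a closed form (4 times the clamped first element) and the
-- four if-chains with one fixed dict lookup (objective: simpler).


-- ===== PORT A =====
def state_to_row (observation : List Int) : Int :=
  let row0 : Int :=
    (PySem.List.pyRange 0 (PySem.List.pyGetD observation 0 0) 1).foldl (fun r _ => r + 4) 0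
  let o1 := PySem.List.pyGetD observation 1 0
  let o2 := PySem.List.pyGetD observation 2 0
  let r1 := if o1 = 0 ∧ o2 = 0 then row0 + 0 else row0
  let r2 := if o1 = 1 ∧ o2 = 0 then r1 + 1 else r1
  let r3 := if o1 = 1 ∧ o2 = 1 then r2 + 2 else r2
  if o1 = 0 ∧ o2 = 1 then r3 + 3 else r3

-- ===== PORT B =====
def rowOffsets : PySem.Dict (Int × Int) Int :=
  PySem.Dict.ofList [((0, 0), 0), ((1, 0), 1), ((1, 1), 2), ((0, 1), 3)]

def state_to_row_alt (observation : List Int) : Int :=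
  4 * max (PySem.List.pyGetD observation 0 0) 0 +
    rowOffsets.getD (PySem.List.pyGetD observation 1 0, PySem.List.pyGetD observation 2 0) 0

-- ===== PRECONDITION & SPEC =====
-- Pre_ requires at least 3 elements: A raises IndexError on lists shorter than 2, and on
-- 2-element lists A's short-circuit accidentally returns when the second element is neither 0
-- nor 1 while B's tuple lookup reads index 2 and raises IndexError there.
def Pre_state_to_row (observation : List Int) : Prop := 3 ≤ observation.length
instance (observation : List Int) : Decidable (Pre_state_to_row observation) := by
  unfold Pre_state_to_row; infer_instance

def pvWitness_state_to_row : List Int := [2, 1, 0]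

def Spec_state_to_row (observation : List Int) (out : Int) : Prop := out = state_to_row_alt observation
instance (observation : List Int) (out : Int) : Decidable (Spec_state_to_row observation out) := by unfold Spec_state_to_row; infer_instance

-- ===== CLAIM (what is proved, stated in full; the proofs are below) =====
def Claim_equal_state_to_row : Prop := ∀ (observation : List Int), Dom_state_to_row observation → Pre_state_to_row observation → Spec_state_to_row observation (state_to_row observation)

-- ===== LEMMAS AND PROOFS =====

-- ===== VERDICT (by name: the statement is the Claim_ definition above) =====
lemma rowOffsets_getD (b c : Int) :
    rowOffsets.getD (b, c) 0 =
      if b = 0 ∧ c = 0 then 0 else if b = 1 ∧ c = 0 then 1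
      else if b = 1 ∧ c = 1 then 2 else if b = 0 ∧ c = 1 then 3 else 0 := by
  have h : rowOffsets =
      ((((PySem.Dict.empty).insert (0, 0) 0).insert (1, 0) 1).insert (1, 1) 2).insert (0, 1) 3 := rfl
  rw [h]
  simp only [PySem.Dict.getD_insert, PySem.Dict.getD_empty, Prod.mk.injEq]
  split_ifs <;> simp_all

theorem state_to_row_spec : Claim_equal_state_to_row := by
  intro obs _ hpre
  match obs with
  | a :: b :: c :: rest =>
    show state_to_row (a :: b :: c :: rest) = state_to_row_alt (a :: b :: c :: rest)
    simp only [state_to_row, state_to_row_alt,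
      PySem.List.foldl_add (g := fun _ => (4 : Int)),
      PySem.List.sum_map_const_int, PySem.List.length_pyRange_one]
    simp only [pysem]
    rw [rowOffsets_getD]
    split_ifs <;> omega
  | [] => simp [Pre_state_to_row] at hpre
  | [_] => simp [Pre_state_to_row] at hpre
  | [_, _] => simp [Pre_state_to_row] at hpre
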